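-- pv_equiv track=rewrite | github.com/fermofou/codes_python | memorama proyecto.py | crea_tablero
-- ===== SOURCE A (Python) =====
-- def crea_tablero(lista):
--     matriz_inicial = []
--     cont = 0
--     sub_lista =[]
--     for i in range(len(lista)):
--         if (cont== 5):
--             sub_lista.append(lista[i])
--             matriz_inicial.append(sub_lista)
--             sub_lista =[]
--             cont = 0
--         else:
--             sub_lista.append(lista[i])
--             cont = cont +1
--     return matriz_inicial
-- ===== SOURCE B (Python) =====
-- def crea_tablero(lista):
--     m = len(lista) // 6
--     return [lista[6 * k : 6 * k + 6] for k in range(m)]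
-- ===== Notes on version B (the rewrite author's own statement) =====
-- stated objective: simpler
-- what changed: Replaces the element-by-element loop with a manual counter and reusable row buffer by direct stride-6 slicing over the count of complete rows (len//6), which also drops any trailing partial row.
import Mathlib
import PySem

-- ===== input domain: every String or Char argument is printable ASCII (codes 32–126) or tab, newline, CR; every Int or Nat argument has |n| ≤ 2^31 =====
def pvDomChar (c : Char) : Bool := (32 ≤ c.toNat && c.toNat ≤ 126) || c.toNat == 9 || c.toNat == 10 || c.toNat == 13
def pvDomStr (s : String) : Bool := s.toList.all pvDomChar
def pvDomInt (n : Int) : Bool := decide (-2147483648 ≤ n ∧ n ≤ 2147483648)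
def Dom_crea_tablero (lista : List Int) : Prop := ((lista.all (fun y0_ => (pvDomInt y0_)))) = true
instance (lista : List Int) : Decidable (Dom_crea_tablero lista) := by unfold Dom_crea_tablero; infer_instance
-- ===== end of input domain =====

-- B reshapes the list into rows of six by stride-6 slicing over the count of complete rows,
-- instead of A's element-by-element append with a counter and a reusable row buffer (objective: simpler).

-- ===== PORT A =====
-- loop body of A: append to sub_lista; on the sixth element flush sub_lista into matriz_inicial
def creaStepA (s : List (List Int) × List Int × Int) (x : Int) :
    List (List Int) × List Int × Int :=
  if s.2.2 == 5 then (s.1 ++ [s.2.1 ++ [x]], [], 0)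
  else (s.1, s.2.1 ++ [x], s.2.2 + 1)

def crea_tablero (lista : List Int) : List (List Int) :=
  ((PySem.List.pyRange 0 (PySem.List.len lista) 1).foldl
    (fun s i => creaStepA s (PySem.List.pyGetD lista i 0)) ([], [], 0)).1

-- ===== PORT B =====
def crea_tablero_alt (lista : List Int) : List (List Int) :=
  (PySem.List.pyRange 0 (PySem.Int.floordiv (PySem.List.len lista) 6) 1).map
    (fun k => PySem.List.slice lista (some (6 * k)) (some (6 * k + 6)))

-- ===== PRECONDITION & SPEC =====
def Spec_crea_tablero (lista : List Int) (out : List (List Int)) : Prop := out = crea_tablero_alt lista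
instance (lista : List Int) (out : List (List Int)) : Decidable (Spec_crea_tablero lista out) := by unfold Spec_crea_tablero; infer_instance

-- ===== CLAIM (what is proved, stated in full; the proofs are below) =====
def Claim_equal_crea_tablero : Prop := ∀ (lista : List Int), Dom_crea_tablero lista → Spec_crea_tablero lista (crea_tablero lista)

-- ===== LEMMAS AND PROOFS =====

/-- Reference chunking: the complete groups of six, in order. -/
def chunk6 : List Int → List (List Int)
  | a :: b :: c :: d :: e :: f :: rest => [a, b, c, d, e, f] :: chunk6 rest
  | _ => []

theorem foldA (n : Nat) : ∀ (lista : List Int), lista.length ≤ n →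
    ∀ (M : List (List Int)), (lista.foldl creaStepA (M, [], 0)).1 = M ++ chunk6 lista := by
  induction n with
  | zero =>
    intro lista h M
    have : lista = [] := List.length_eq_zero_iff.mp (Nat.le_zero.mp h)
    subst this; simp [chunk6]
  | succ n ih =>
    intro lista h M
    rcases lista with _ | ⟨a, _ | ⟨b, _ | ⟨c, _ | ⟨d, _ | ⟨e, _ | ⟨f, rest⟩⟩⟩⟩⟩⟩
    · simp [chunk6]
    · simp [List.foldl, creaStepA, chunk6]
    · simp [List.foldl, creaStepA, chunk6]
    · simp [List.foldl, creaStepA, chunk6]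
    · simp [List.foldl, creaStepA, chunk6]
    · simp [List.foldl, creaStepA, chunk6]
    · have hr : rest.length ≤ n := by simp at h; omega
      have : ((a :: b :: c :: d :: e :: f :: rest).foldl creaStepA (M, [], 0)) =
          rest.foldl creaStepA (M ++ [[a, b, c, d, e, f]], [], 0) := by
        simp [List.foldl, creaStepA]
      rw [this, ih rest hr (M ++ [[a, b, c, d, e, f]])]
      simp [chunk6]

theorem altB (n : Nat) : ∀ (lista : List Int), lista.length ≤ n →
    (List.range (lista.length / 6)).map (fun k => (lista.drop (6 * k)).take 6) = chunk6 lista := by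
  induction n with
  | zero =>
    intro lista h
    have : lista = [] := List.length_eq_zero_iff.mp (Nat.le_zero.mp h)
    subst this; simp [chunk6]
  | succ n ih =>
    intro lista h
    rcases lista with _ | ⟨a, _ | ⟨b, _ | ⟨c, _ | ⟨d, _ | ⟨e, _ | ⟨f, rest⟩⟩⟩⟩⟩⟩
    · simp [chunk6]
    · simp [chunk6]
    · simp [chunk6]
    · simp [chunk6]
    · simp [chunk6]
    · simp [chunk6]
    · have hr : rest.length ≤ n := by simp at h; omega
      have hlen : (a :: b :: c :: d :: e :: f :: rest).length / 6 = rest.length / 6 + 1 := by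
        simp; omega
      rw [hlen, List.range_succ_eq_map]
      simp only [List.map_cons, List.map_map]
      show _ :: _ = chunk6 _
      rw [chunk6]
      congr 1
      rw [← ih rest hr]
      apply List.map_congr_left
      intro k _
      rfl

theorem altE (lista : List Int) :
    crea_tablero_alt lista = (List.range (lista.length / 6)).map (fun k => (lista.drop (6 * k)).take 6) := by
  unfold crea_tablero_alt
  have hm : PySem.Int.floordiv (PySem.List.len lista) 6 = ((lista.length / 6 : Nat) : Int) := by
    simp [PySem.Int.floordiv]
    rw [Int.fdiv_eq_ediv]
    omega
  rw [hm, PySem.List.pyRange_zero_natCast, List.map_map]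
  apply List.map_congr_left
  intro k _
  simp only [Function.comp_apply]
  have h1 : (6 : Int) * (k : Int) = ((6 * k : Nat) : Int) := by push_cast; ring
  rw [h1, show ((6 : Int)) = ((6 : Nat) : Int) from rfl]
  exact PySem.List.slice_natCast_add lista (6 * k) 6

-- ===== VERDICT (by name: the statement is the Claim_ definition above) =====
theorem crea_tablero_spec : Claim_equal_crea_tablero := by
  intro lista _
  unfold Spec_crea_tablero crea_tablero
  rw [PySem.List.foldl_pyRange_zero_pyGetD lista 0 creaStepA ([], [], 0)]
  rw [foldA lista.length lista le_rfl []]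
  rw [altE, altB lista.length lista le_rfl]
  simp
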